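-- pv_equiv track=rewrite | github.com/LEEJEHEON/Jerry_TIL | Coding_Test/Python/Programmerces/LV2_프로세스.py | solution
-- ===== SOURCE A (Python) =====
-- from collections import deque
--
-- def solution(priorities, location):
--     dq = deque(priorities)
--     answer = 1
--
--     while True:
--         # any = 1개 라도 true 면 true
--         if any(dq[0] < m for m in dq) :
--             dq.append(dq[0])
--             dq.popleft()
--             if location == 0:
--                 location = len(dq)-1
--             else :
--                 location -= 1
--         else :
--             if location == 0:
--                 return answer
--             else :
--                 location -= 1
--                 dq.popleft()
--                 answer += 1
-- ===== SOURCE B (Python) =====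
-- def solution(priorities, location):
--     q = [(i, p) for i, p in enumerate(priorities)]
--     answer = 0
--     while True:
--         m = max(p for _, p in q)
--         k = next(i for i, (_, p) in enumerate(q) if p == m)
--         answer += 1
--         if q[k][0] == location:
--             return answer
--         q = q[k + 1:] + q[:k]
-- ===== Notes on version B (the rewrite author's own statement) =====
-- stated objective: faster
-- what changed: Instead of rotating the deque one element at a time (re-scanning the whole deque with any() at every rotation), B jumps each round straight to the first maximal element via max + findIdx + one slice, and tracks the target by its original index rather than by its shifting position. Pre_ excludes empty priority lists and out-of-range locations: there A raises IndexError or, when the leftover location counter happens to hit 0 just as the queue empties, returns an accidental count for a nonexistent process, while B raises ValueError (max of an empty sequence).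
-- outside the precondition, e.g. on solution([], 0): A returns 1, B raises ValueError; on solution([1], 1): A returns 2, B raises ValueError; on solution([1, 2], 5): A raises IndexError, B raises ValueError
import Mathlib
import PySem

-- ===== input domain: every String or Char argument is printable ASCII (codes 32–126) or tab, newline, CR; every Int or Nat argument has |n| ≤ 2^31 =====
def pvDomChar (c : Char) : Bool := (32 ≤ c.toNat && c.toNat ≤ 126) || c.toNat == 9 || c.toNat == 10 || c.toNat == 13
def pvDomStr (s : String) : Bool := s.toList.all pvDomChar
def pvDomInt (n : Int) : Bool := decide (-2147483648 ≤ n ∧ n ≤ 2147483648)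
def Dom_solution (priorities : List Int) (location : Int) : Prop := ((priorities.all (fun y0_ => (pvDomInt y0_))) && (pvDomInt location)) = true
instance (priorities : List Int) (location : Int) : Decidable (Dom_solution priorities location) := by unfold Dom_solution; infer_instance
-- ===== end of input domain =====

-- B removes A's one-by-one deque rotations: each round it jumps straight to the first
-- maximal element (max + findIdx + one slice), tracking the target by its original index.

-- ===== PORT A =====
-- loop of A: dq the deque, `location` the target's current position, `answer` the count so far.
-- fuel is a totalisation guard only (n*n+n+1 steps always suffice; proved below); the
-- [] cases are where Python raises IndexError (excluded by Pre_) or returns answer.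
def aGo (fuel : Nat) (dq : List Int) (location answer : Int) : Int :=
  match fuel with
  | 0 => answer
  | fuel + 1 =>
    match dq with
    | [] => answer
    | x :: rest =>
      if (x :: rest).any (fun m => decide (x < m)) then
        aGo fuel (rest ++ [x])
          (if location = 0 then ((rest ++ [x]).length : Int) - 1 else location - 1) answer
      else
        if location = 0 then answer
        else aGo fuel rest (location - 1) (answer + 1)

def solution (priorities : List Int) (location : Int) : Int :=
  aGo (priorities.length * priorities.length + priorities.length + 1) priorities location 1

-- ===== PORT B =====
-- loop of B: q holds (original index, priority); fuel = |q| suffices (one element removed per round);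
-- the none cases are where Python's max()/q[k] raise (outside Pre_ / unreachable).
def bGo (fuel : Nat) (q : List (Int × Int)) (location answer : Int) : Int :=
  match fuel with
  | 0 => answer
  | fuel + 1 =>
    match PySem.List.max? (q.map Prod.snd) (fun y => y) with
    | none => answer
    | some m =>
      let k := q.findIdx (fun e => e.2 == m)
      match q[k]? with
      | none => answer + 1
      | some e =>
        if e.1 = location then answer + 1
        else bGo fuel (q.drop (k + 1) ++ q.take k) location (answer + 1)

def solution_alt (priorities : List Int) (location : Int) : Int :=
  bGo priorities.length (PySem.List.enumerate priorities) location 0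

-- ===== PRECONDITION & SPEC =====
-- Pre_ excludes empty priority lists and out-of-range locations: there A raises IndexError or,
-- when the leftover location counter happens to hit 0 just as the queue empties, returns an
-- accidental count for a nonexistent process, while B raises ValueError (max of an empty sequence).
def Pre_solution (priorities : List Int) (location : Int) : Prop :=
  priorities ≠ [] ∧ 0 ≤ location ∧ location < (priorities.length : Int)
instance (priorities : List Int) (location : Int) : Decidable (Pre_solution priorities location) := by
  unfold Pre_solution; infer_instance

def pvWitness_solution : List Int × Int := ([2, 1, 3, 2], 2)

def Spec_solution (priorities : List Int) (location : Int) (out : Int) : Prop := out = solution_alt priorities location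
instance (priorities : List Int) (location : Int) (out : Int) : Decidable (Spec_solution priorities location out) := by unfold Spec_solution; infer_instance

-- ===== CLAIM (what is proved, stated in full; the proofs are below) =====
def Claim_equal_solution : Prop := ∀ (priorities : List Int) (location : Int), Dom_solution priorities location → Pre_solution priorities location → Spec_solution priorities location (solution priorities location)

-- ===== LEMMAS AND PROOFS =====

-- A's rotation phase: while every element of u is < some m ∈ w, the deque u ++ w rotates to
-- w ++ u, the tracked position shifting cyclically; no pop happens, answer unchanged.
theorem aGo_rot (u : List Int) : ∀ (w : List Int) (m location answer : Int) (fuel : Nat),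
    m ∈ w → (∀ x ∈ u, x < m) → 0 ≤ location → location < ((u ++ w).length : Int) →
    aGo (fuel + u.length) (u ++ w) location answer
      = aGo fuel (w ++ u)
          (if location < (u.length : Int) then location + w.length else location - u.length)
          answer := by
  induction u with
  | nil =>
    intro w m location answer fuel hm hu h0 hlt
    simp only [List.length_nil, Nat.add_zero, List.nil_append, List.append_nil, Nat.cast_zero]
    rw [if_neg (by omega), sub_zero]
  | cons x u' ih =>
    intro w m location answer fuel hm hu h0 hlt
    have hxm : x < m := hu x (by simp)
    have hlen : ((x :: u') ++ w).length = u'.length + w.length + 1 := by simp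
    have h1 : fuel + (x :: u').length = (fuel + u'.length) + 1 := by simp only [List.length_cons]; omega
    rw [h1]
    show aGo ((fuel + u'.length) + 1) (x :: (u' ++ w)) location answer = _
    have hany : (x :: (u' ++ w)).any (fun m' => decide (x < m')) = true := by
      simp only [List.any_eq_true]
      exact ⟨m, by simp [hm], by simp [hxm]⟩
    rw [aGo]
    simp only [hany, if_true]
    set loc1 : Int := if location = 0 then (((u' ++ w) ++ [x]).length : Int) - 1 else location - 1 with hloc1
    have hloc1b : 0 ≤ loc1 ∧ loc1 < ((u' ++ (w ++ [x])).length : Int) := by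
      rw [hloc1]; split_ifs <;> simp_all <;> omega
    rw [List.append_assoc]
    rw [ih (w ++ [x]) m loc1 answer fuel (by simp [hm]) (fun y hy => hu y (by simp [hy])) hloc1b.1 hloc1b.2]
    have : (w ++ [x]) ++ u' = w ++ (x :: u') := by simp
    rw [this]
    congr 1
    rw [hloc1]
    simp only [List.length_append, List.length_cons, List.length_nil]
    split_ifs <;> push_cast at * <;> omega

-- Main invariant: if q's snd-projection is A's deque, the element of q at position loc is the
-- one whose fst is `location` (and no other), and both fuels suffice, the two loops agree
-- (A's running answer is one ahead of B's).
theorem mainLemma (n : Nat) : ∀ (q : List (Int × Int)) (location loc answer : Int) (fuelA fuelB : Nat),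
    q.length = n → 0 < n → n * n ≤ fuelA → n ≤ fuelB →
    0 ≤ loc → loc < (n : Int) →
    (∀ (j : Nat), (hj : j < q.length) → (q[j].1 = location ↔ (j : Int) = loc)) →
    aGo fuelA (q.map Prod.snd) loc answer = bGo fuelB q location (answer - 1) := by
  induction n using Nat.strong_induction_on with
  | _ n ih =>
  intro q location loc answer fuelA fuelB hq hn hfa hfb h0 hlt hinv
  obtain ⟨p, rfl⟩ : ∃ p, n = p + 1 := ⟨n - 1, by omega⟩
  set dq := q.map Prod.snd with hdq
  have hdqlen : dq.length = p + 1 := by simp [hdq, hq]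
  have hqne : q ≠ [] := by intro h; simp [h] at hq
  have hdqne : dq ≠ [] := by simp [hdq, hqne]
  obtain ⟨m, hmax⟩ : ∃ m, PySem.List.max? dq (fun y => y) = some m := by
    cases hmx : PySem.List.max? dq (fun y => y) with
    | none => exact absurd ((PySem.List.max?_eq_none_iff _ _).1 hmx) hdqne
    | some m => exact ⟨m, rfl⟩
  have hmmem : m ∈ dq := PySem.List.max?_mem hmax
  have hmmax : ∀ y ∈ dq, y ≤ m := PySem.List.max?_isMax hmax
  set k := q.findIdx (fun e => e.2 == m) with hk
  have hkl : k < q.length := by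
    apply List.findIdx_lt_length_of_exists
    obtain ⟨e, he, he2⟩ := List.mem_map.1 hmmem
    exact ⟨e, he, by simp [he2]⟩
  have hkn : k < p + 1 := by omega
  have hqk : q[k].2 = m := by
    have h := @List.findIdx_getElem _ (fun e => e.2 == m) q hkl
    simpa using h
  have hjlt : ∀ (j : Nat) (hjq : j < q.length), j < k → q[j].2 < m := by
    intro j hjq hj
    have hne := List.not_of_lt_findIdx (p := fun e => e.2 == m) (xs := q) hj
    simp only [beq_eq_false_iff_ne, ne_eq] at hne
    have hle : q[j].2 ≤ m := hmmax _ (List.mem_map_of_mem (List.getElem_mem hjq))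
    omega
  set u := dq.take k with hu
  set v := dq.drop (k + 1) with hv
  have hkdq : k < dq.length := by omega
  have hdqk : dq[k] = m := by simp [hdq, hqk]
  have hsplit : dq = u ++ (m :: v) := by
    rw [hu, hv, ← hdqk, ← List.drop_eq_getElem_cons hkdq, List.take_append_drop]
  have hul : u.length = k := by simp [hu]; omega
  have hvl : v.length = p - k := by simp [hv, hdqlen]
  -- rotation phase of A
  have hrot := aGo_rot u (m :: v) m loc answer (fuelA - k - 1 + 1) (by simp)
      (by intro x hx
          obtain ⟨j, hj, hxj⟩ := List.mem_iff_getElem.1 hx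
          have hjk : j < k := by omega
          have hjq : j < q.length := by omega
          have hxd : x = q[j].2 := by
            rw [← hxj]; simp [hu, hdq, List.getElem_take]
          rw [hxd]; exact hjlt j hjq hjk)
      h0 (by rw [← hsplit]; omega)
  have hnn : p + 1 ≤ (p + 1) * (p + 1) := Nat.le_mul_of_pos_left _ hn
  have hfa2 : fuelA = (fuelA - k - 1 + 1) + u.length := by rw [hul]; omega
  rw [hsplit, hfa2, hrot]
  set loc' : Int := if loc < (u.length : Int) then loc + ((m :: v).length : Int)
      else loc - (u.length : Int) with hloc'
  have hloc'b : (loc' = 0 ↔ (k : Int) = loc) ∧ 0 ≤ loc' ∧ loc' < (p : Int) + 1 := by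
    rw [hloc']; simp only [List.length_cons, hul, hvl]
    split_ifs <;> push_cast <;> omega
  -- the pop step of A
  show aGo (fuelA - k - 1 + 1) (m :: (v ++ u)) loc' answer = _
  rw [aGo]
  have hanyf : ((m :: (v ++ u)).any fun y => decide (m < y)) = false := by
    rw [List.any_eq_false]
    intro y hy
    simp only [decide_eq_true_eq]
    rcases List.mem_cons.1 hy with h | h
    · omega
    · have hle : y ≤ m := by
        rcases List.mem_append.1 h with h | h
        · exact hmmax y (List.mem_of_mem_drop h)
        · exact hmmax y (List.mem_of_mem_take h)
      omega
  simp only [hanyf, Bool.false_eq_true, if_false]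
  -- the step of B
  obtain ⟨fB, hfB⟩ : ∃ fB, fuelB = fB + 1 := ⟨fuelB - 1, by omega⟩
  rw [hfB, bGo]
  rw [← hdq, hmax]
  simp only [← hk, List.getElem?_eq_getElem hkl]
  have hck := hinv k hkl
  by_cases hcase : (k : Int) = loc
  · rw [if_pos (hloc'b.1.2 hcase), if_pos (hck.2 hcase)]
    omega
  · rw [if_neg (fun h => hcase (hloc'b.1.1 h)), if_neg (fun h => hcase (hck.1 h))]
    have hsub : answer - 1 + 1 = answer := by omega
    rw [hsub]
    set q' := q.drop (k + 1) ++ q.take k with hq'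
    have hq'map : q'.map Prod.snd = v ++ u := by
      simp [hq', hu, hv, hdq, List.map_append, List.map_drop, List.map_take]
    have hq'len : q'.length = p := by simp [hq', hq]; omega
    have hn1 : 0 < p := by omega
    have hsq : (p + 1) * (p + 1) = p * p + p + p + 1 := by ring
    have hinv' : ∀ (j : Nat), (hj : j < q'.length) → (q'[j].1 = location ↔ (j : Int) = loc' - 1) := by
      intro j hj
      have hdl : (q.drop (k + 1)).length = p - k := by simp [hq]
      simp only [hq'] at hj ⊢
      rw [List.getElem_append]
      split_ifs with hc2
      · rw [List.getElem_drop, hinv (k + 1 + j) (by omega)]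
        rw [hloc']; simp only [List.length_cons, hul, hvl]
        constructor <;> intro hh <;> [skip; skip] <;> (revert hh; split_ifs <;> push_cast <;> omega)
      · rw [List.getElem_take, hinv (j - (q.drop (k+1)).length) (by rw [hdl]; omega)]
        rw [hloc']; simp only [List.length_cons, hul, hvl, hdl]
        rw [hdl] at hc2
        constructor <;> intro hh <;> (revert hh; split_ifs <;> push_cast [Nat.cast_sub (by omega : p - k ≤ j)] <;> omega)
    have hne0 : loc' ≠ 0 := fun h => hcase (hloc'b.1.1 h)
    have hrec := ih p (by omega) q' location (loc' - 1) (answer + 1) (fuelA - k - 1) fB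
      hq'len hn1 (by omega) (by omega)
      (by have := hloc'b.2.1; omega) (by have := hloc'b.2.2; omega) hinv'
    rw [← hq'map, hrec]
    have : answer + 1 - 1 = answer := by omega
    rw [this]

-- ===== VERDICT (by name: the statement is the Claim_ definition above) =====
theorem solution_spec : Claim_equal_solution := by
  intro ps location _ hpre
  obtain ⟨h1, h2, h3⟩ := hpre
  unfold Spec_solution solution solution_alt
  have hlen := PySem.List.length_enumerate ps 0
  have hmap : (PySem.List.enumerate ps).map Prod.snd = ps := PySem.List.map_snd_enumerate ps 0
  have hn : 0 < ps.length := by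
    cases ps with
    | nil => exact absurd rfl h1
    | cons a l => simp
  have hm := mainLemma ps.length (PySem.List.enumerate ps) location location 1
      (ps.length * ps.length + ps.length + 1) ps.length hlen hn (by omega) le_rfl h2 h3
      (by intro j hj
          rw [PySem.List.getElem_enumerate ps 0 j hj]
          push_cast
          omega)
  rw [hmap] at hm
  simpa using hm
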